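-- pv_equiv track=rewrite | github.com/Csanad98/InfoErettsegiMegoldasok | 2014 Máj/B/loves.py | loertek
-- ===== SOURCE A (Python) =====
-- def loertek (sor):
--     ertek = 0
--     aktpont = 20
--     for num in range(len(sor)):
--         if aktpont > 0 and sor[num] == "-":
--             aktpont -=1
--         else:
--             ertek +=aktpont
--
--     return ertek
-- ===== SOURCE B (Python) =====
-- def loertek(sor):
--     parts = sor.split("-")
--     return sum(len(p) * max(0, 20 - j) for j, p in enumerate(parts))
-- ===== Notes on version B (the rewrite author's own statement) =====
-- stated objective: faster
-- what changed: Replaces the per-character stateful loop (running score counter decremented on dashes) by splitting the string on the dash separator and summing len(part) * max(0, 20 - j) over the enumerated parts, moving the character scan into str.split.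
import Mathlib
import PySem

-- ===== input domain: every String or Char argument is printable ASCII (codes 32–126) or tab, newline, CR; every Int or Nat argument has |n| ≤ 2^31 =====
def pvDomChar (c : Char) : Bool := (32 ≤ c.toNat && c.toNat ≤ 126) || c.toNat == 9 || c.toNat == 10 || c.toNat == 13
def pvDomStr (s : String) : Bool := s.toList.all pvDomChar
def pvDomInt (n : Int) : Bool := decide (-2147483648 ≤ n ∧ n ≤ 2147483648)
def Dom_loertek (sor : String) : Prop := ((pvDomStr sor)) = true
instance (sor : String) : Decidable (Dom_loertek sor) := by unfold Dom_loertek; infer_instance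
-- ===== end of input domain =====

-- B replaces A's per-character running-counter loop by split-on-dash plus a weighted sum of part lengths (simpler decomposition, same cost).

-- ===== PORT A =====
-- A iterates over the characters of sor (for num in range(len(sor)): sor[num]),
-- keeping (ertek, aktpont); ported as a foldl over sor.toList with the same pair state.
def loertek (sor : String) : Int :=
  (sor.toList.foldl
    (fun (st : Int × Int) c =>
      if st.2 > 0 ∧ c = '-' then (st.1, st.2 - 1) else (st.1 + st.2, st.2))
    (0, 20)).1

-- ===== PORT B =====
-- parts = sor.split("-");  sum(len(p) * max(0, 20 - j) for j, p in enumerate(parts))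
def loertek_alt (sor : String) : Int :=
  let parts := PySem.Chars.splitOn sor.toList ['-']
  (PySem.List.enumerate parts).foldl
    (fun acc jp => acc + (jp.2.length : Int) * max 0 (20 - jp.1)) 0

-- ===== PRECONDITION & SPEC =====
def Spec_loertek (sor : String) (out : Int) : Prop := out = loertek_alt sor
instance (sor : String) (out : Int) : Decidable (Spec_loertek sor out) := by unfold Spec_loertek; infer_instance

-- ===== CLAIM (what is proved, stated in full; the proofs are below) =====
def Claim_equal_loertek : Prop := ∀ (sor : String), Dom_loertek sor → Spec_loertek sor (loertek sor)

-- ===== LEMMAS AND PROOFS =====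

-- A's loop as a structural recursion (ertek, aktpont passed separately).
def pvAloop : List Char → Int → Int → Int
  | [], e, _ => e
  | c :: r, e, k => if k > 0 ∧ c = '-' then pvAloop r e (k - 1) else pvAloop r (e + k) k

theorem pvAloop_eq_foldl (cs : List Char) (e k : Int) :
    (cs.foldl
      (fun (st : Int × Int) c =>
        if st.2 > 0 ∧ c = '-' then (st.1, st.2 - 1) else (st.1 + st.2, st.2))
      (e, k)).1 = pvAloop cs e k := by
  induction cs generalizing e k with
  | nil => rfl
  | cons c r ih =>
    simp only [List.foldl_cons, pvAloop]
    by_cases h : k > 0 ∧ c = '-' <;> simp [h, ih]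

theorem pvAloop_add (cs : List Char) : ∀ (e k : Int),
    pvAloop cs e k = e + pvAloop cs 0 k := by
  induction cs with
  | nil => intro e k; simp [pvAloop]
  | cons c r ih =>
    intro e k
    simp only [pvAloop]
    by_cases h : k > 0 ∧ c = '-'
    · rw [if_pos h, if_pos h, ih]
    · rw [if_neg h, if_neg h, ih (e + k) k, ih (0 + k) k]
      ring

-- B's weighted sum as a structural recursion over the parts, with running index j.
def pvBgo : Int → List (List Char) → Int
  | _, [] => 0
  | j, p :: ps => (p.length : Int) * max 0 (20 - j) + pvBgo (j + 1) ps

theorem pvBgo_eq_foldl (ps : List (List Char)) (j acc : Int) :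
    (PySem.List.enumerate ps j).foldl
      (fun acc jp => acc + (jp.2.length : Int) * max 0 (20 - jp.1)) acc
      = acc + pvBgo j ps := by
  induction ps generalizing j acc with
  | nil => simp [PySem.List.enumerate, pvBgo]
  | cons p ps ih =>
    simp only [PySem.List.enumerate, List.foldl_cons, pvBgo, ih]
    ring

-- The accumulator form of Python's str.split for the single-character separator '-'.
def pvSplit : List Char → List Char → List (List Char)
  | [], cur => [cur.reverse]
  | c :: r, cur => if c = '-' then cur.reverse :: pvSplit r [] else pvSplit r (c :: cur)

theorem pvSplit_go (fuel : Nat) : ∀ (l cur : List Char) (acc : List (List Char)),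
    l.length ≤ fuel →
    PySem.Chars.splitOn.go ['-'] fuel l cur acc = acc.reverse ++ pvSplit l cur := by
  induction fuel with
  | zero =>
    intro l cur acc h
    have : l = [] := by cases l <;> simp_all
    subst this
    simp [PySem.Chars.splitOn.go, pvSplit]
  | succ n ih =>
    intro l cur acc h
    cases l with
    | nil => simp [PySem.Chars.splitOn.go, pvSplit]
    | cons c r =>
      by_cases hc : c = '-'
      · subst hc
        have h1 : PySem.Chars.splitOn.go ['-'] (n + 1) ('-' :: r) cur acc
            = PySem.Chars.splitOn.go ['-'] n r [] (cur.reverse :: acc) := by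
          rw [PySem.Chars.splitOn.go]
          simp [List.isPrefixOf]
        rw [h1, ih r [] _ (by simp at h; omega)]
        simp [pvSplit]
      · have hbc : ('-' == c) = false := by simpa using fun h => hc h.symm
        have h1 : PySem.Chars.splitOn.go ['-'] (n + 1) (c :: r) cur acc
            = PySem.Chars.splitOn.go ['-'] n r (c :: cur) acc := by
          rw [PySem.Chars.splitOn.go]
          simp [List.isPrefixOf, hbc]
        rw [h1, ih r _ _ (by simp at h; omega)]
        simp [pvSplit, hc]

theorem pvSplitOn_eq (cs : List Char) :
    PySem.Chars.splitOn cs ['-'] = pvSplit cs [] := by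
  unfold PySem.Chars.splitOn
  rw [pvSplit_go] <;> simp

-- Key invariant: the weighted sum over the split parts, starting at index j with the
-- current (unfinished) part cur, equals A's loop run with counter max 0 (20 - j).
theorem pvKey (cs : List Char) : ∀ (cur : List Char) (j : Int),
    pvBgo j (pvSplit cs cur) =
      (cur.length : Int) * max 0 (20 - j) + pvAloop cs 0 (max 0 (20 - j)) := by
  induction cs with
  | nil => intro cur j; simp [pvSplit, pvBgo, pvAloop]
  | cons c r ih =>
    intro cur j
    by_cases hc : c = '-'
    · subst hc
      have hs : pvSplit ('-' :: r) cur = cur.reverse :: pvSplit r [] := by simp [pvSplit]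
      rw [hs, pvBgo, ih]
      simp only [pvAloop]
      by_cases hk : max 0 (20 - j) > 0
      · rw [if_pos ⟨hk, trivial⟩]
        have h1 : max 0 (20 - (j + 1)) = max 0 (20 - j) - 1 := by omega
        rw [h1]
        simp only [List.length_reverse, List.length_nil]
        push_cast
        ring
      · rw [if_neg (by tauto)]
        have h1 : max 0 (20 - (j + 1)) = 0 := by omega
        have h2 : max 0 (20 - j) = 0 := by omega
        rw [h1, h2, pvAloop_add r (0 + 0) 0]
        simp only [List.length_reverse, List.length_nil]
        push_cast
        ring
    · have hs : pvSplit (c :: r) cur = pvSplit r (c :: cur) := by simp [pvSplit, hc]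
      rw [hs, ih]
      simp only [pvAloop]
      rw [if_neg (by tauto)]
      rw [pvAloop_add r (0 + max 0 (20 - j)) (max 0 (20 - j))]
      simp only [List.length_cons]
      push_cast
      ring

-- ===== VERDICT (by name: the statement is the Claim_ definition above) =====
theorem loertek_spec : Claim_equal_loertek := by
  intro sor _
  unfold Spec_loertek loertek loertek_alt
  rw [pvAloop_eq_foldl, pvSplitOn_eq, pvBgo_eq_foldl, pvKey]
  norm_num
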